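-- pv_equiv track=rewrite | github.com/ukryule/playground | fourcards.py | examine_hand
-- ===== SOURCE A (Python) =====
-- def examine_hand(hand):
--   """Analyze given hand and return number of times with 4 of the same cards."""
--   nums = [x % 13 for x in hand]
--   four = 0
--   for i in range(13):
--     count = nums.count(i)
--     if count == 4:
--       four += 1
--   return four
-- ===== SOURCE B (Python) =====
-- def examine_hand(hand):
--   """Analyze given hand and return number of times with 4 of the same cards."""
--   nums = sorted(x % 13 for x in hand)
--   four = 0
--   run = 0
--   prev = None
--   for v in nums:
--     if v == prev:
--       run += 1
--     else:
--       if run == 4: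
--         four += 1
--       run = 1
--       prev = v
--   if run == 4:
--     four += 1
--   return four
-- ===== Notes on version B (the rewrite author's own statement) =====
-- stated objective: alternative
-- what changed: Replaces A's 13 repeated nums.count scans with sort-then-run-length-scan: sort the residues, then one linear sweep counting maximal runs whose length is exactly 4.
import Mathlib
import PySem

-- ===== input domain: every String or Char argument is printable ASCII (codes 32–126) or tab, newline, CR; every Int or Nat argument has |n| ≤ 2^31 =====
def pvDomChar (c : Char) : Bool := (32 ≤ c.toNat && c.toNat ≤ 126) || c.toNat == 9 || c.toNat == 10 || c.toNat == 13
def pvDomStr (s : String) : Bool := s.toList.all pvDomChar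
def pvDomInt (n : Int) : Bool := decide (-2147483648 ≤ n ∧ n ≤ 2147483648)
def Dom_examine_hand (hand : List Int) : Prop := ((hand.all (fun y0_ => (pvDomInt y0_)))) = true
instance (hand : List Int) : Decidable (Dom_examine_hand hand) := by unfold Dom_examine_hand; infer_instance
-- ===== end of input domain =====

-- B replaces A's 13 repeated nums.count scans with sort-then-run-length-scan: sort the
-- residues, then one linear sweep counting maximal runs of length exactly 4 (objective: alternative).

-- ===== PORT A =====
def examine_hand (hand : List Int) : Int :=
  let nums := hand.map (fun x => PySem.Int.mod x 13)
  (PySem.List.pyRange 0 13 1).foldl (fun four i =>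
    let count : Int := (nums.count i : Int)
    if count == 4 then four + 1 else four) 0

-- ===== PORT B =====
-- one step of B's sweep over the sorted residues: state = (four, run, prev)
def ehStep (st : Int × Int × Option Int) (v : Int) : Int × Int × Option Int :=
  if some v == st.2.2 then (st.1, st.2.1 + 1, st.2.2)
  else ((if st.2.1 == 4 then st.1 + 1 else st.1), 1, some v)

def examine_hand_alt (hand : List Int) : Int :=
  let nums := PySem.List.sorted (hand.map (fun x => PySem.Int.mod x 13)) (fun x => x) false
  let s := nums.foldl ehStep (0, 0, none)
  if s.2.1 == 4 then s.1 + 1 else s.1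

-- ===== PRECONDITION & SPEC =====
def Spec_examine_hand (hand : List Int) (out : Int) : Prop := out = examine_hand_alt hand
instance (hand : List Int) (out : Int) : Decidable (Spec_examine_hand hand out) := by unfold Spec_examine_hand; infer_instance

-- ===== CLAIM (what is proved, stated in full; the proofs are below) =====
def Claim_equal_examine_hand : Prop := ∀ (hand : List Int), Dom_examine_hand hand → Spec_examine_hand hand (examine_hand hand)

-- ===== LEMMAS AND PROOFS =====

-- number of distinct values occurring exactly 4 times in l
def ehD (l : List Int) : Int := (l.dedup.countP (fun v => l.count v == 4) : Int)

-- Two duplicate-free lists containing the same elements satisfying p have equal countP p.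
theorem countP_eq_of_nodup (p : Int → Bool) (l1 l2 : List Int)
    (h1 : l1.Nodup) (h2 : l2.Nodup)
    (h : ∀ x, p x = true → (x ∈ l1 ↔ x ∈ l2)) : l1.countP p = l2.countP p := by
  rw [List.countP_eq_length_filter, List.countP_eq_length_filter]
  apply List.Perm.length_eq
  rw [List.perm_ext_iff_of_nodup (h1.filter p) (h2.filter p)]
  intro x
  simp only [List.mem_filter]
  constructor
  · rintro ⟨hm, hp⟩; exact ⟨(h x hp).mp hm, hp⟩
  · rintro ⟨hm, hp⟩; exact ⟨(h x hp).mpr hm, hp⟩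

theorem ehD_cons (a : Int) (t : List Int) :
    ehD (a :: t) = (if (a :: t).count a == 4 then 1 else 0)
      + ehD (t.filter (fun x => !(x == a))) := by
  unfold ehD
  have hna : a ∉ (t.filter (fun x => !(x == a))).dedup := by
    simp [List.mem_dedup, List.mem_filter]
  have h1 : (a :: t).dedup.countP (fun v => (a :: t).count v == 4)
      = (a :: (t.filter (fun x => !(x == a))).dedup).countP (fun v => (a :: t).count v == 4) := by
    apply countP_eq_of_nodup _ _ _ (List.nodup_dedup _)
      (List.Nodup.cons hna (List.nodup_dedup _))
    intro x _
    simp only [List.mem_dedup, List.mem_cons, List.mem_filter, Bool.not_eq_eq_eq_not,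
      Bool.not_true, beq_eq_false_iff_ne, ne_eq]
    constructor
    · rintro (rfl | hx)
      · exact Or.inl rfl
      · by_cases hxa : x = a
        · exact Or.inl hxa
        · exact Or.inr ⟨hx, hxa⟩
    · rintro (rfl | ⟨hx, _⟩)
      · exact Or.inl rfl
      · exact Or.inr hx
  rw [h1, List.countP_cons]
  have h2 : (t.filter (fun x => !(x == a))).dedup.countP (fun v => (a :: t).count v == 4)
      = (t.filter (fun x => !(x == a))).dedup.countP
          (fun v => (t.filter (fun x => !(x == a))).count v == 4) := by
    apply List.countP_congr
    intro x hx
    have hxa : x ≠ a := by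
      have := List.mem_dedup.mp hx
      simp only [List.mem_filter, Bool.not_eq_eq_eq_not, Bool.not_true,
        beq_eq_false_iff_ne, ne_eq] at this
      exact this.2
    have hc1 : (a :: t).count x = t.count x := by
      rw [List.count_cons]; simp [Ne.symm hxa]
    have hc2 : (t.filter (fun x => !(x == a))).count x = t.count x := by
      rw [List.count_filter]; simp [hxa]
    simp [hc1, hc2]
  rw [h2]
  push_cast
  simp only [beq_iff_eq]
  split_ifs <;> omega

-- the core run-length invariant: folding B's step over a sorted tail, all ≥ prev
theorem ehRun (l : List Int) (hs : l.Pairwise (· ≤ ·)) (p four run : Int)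
    (hp : ∀ x ∈ l, p ≤ x) :
    (let s := l.foldl ehStep (four, run, some p);
     if s.2.1 == 4 then s.1 + 1 else s.1)
      = four + (if run + (l.count p : Int) == 4 then 1 else 0)
        + ehD (l.filter (fun x => !(x == p))) := by
  induction l generalizing p four run with
  | nil =>
      simp only [List.foldl_nil, List.count_nil, List.filter_nil]
      show (if run == 4 then four + 1 else four) = _
      have : ehD [] = 0 := rfl
      rw [this]
      by_cases h : run = 4 <;> simp [h]
  | cons a t ih =>
      rw [List.pairwise_cons] at hs
      obtain ⟨ha, ht⟩ := hs
      have hpa : p ≤ a := hp a (List.mem_cons_self)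
      simp only [List.foldl_cons]
      by_cases hap : a = p
      · subst hap
        have hstep : ehStep (four, run, some a) a = (four, run + 1, some a) := by
          simp [ehStep]
        rw [hstep, ih ht a four (run + 1) ha]
        have hcnt : (a :: t).count a = t.count a + 1 := by
          rw [List.count_cons]; simp
        have hfil : (a :: t).filter (fun x => !(x == a)) = t.filter (fun x => !(x == a)) := by
          simp
        rw [hcnt, hfil]
        have hcond : (run + 1 + (t.count a : Int)) = (run + ((t.count a + 1 : Nat) : Int)) := by
          push_cast; ring
        rw [hcond]
      · have hpa' : p < a := lt_of_le_of_ne hpa (fun h => hap h.symm)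
        have hpt : p ∉ t := fun h => absurd (lt_of_lt_of_le hpa' (ha p h)) (lt_irrefl p)
        have hstep : ehStep (four, run, some p) a
            = ((if run == 4 then four + 1 else four), 1, some a) := by
          simp [ehStep, hap]
        rw [hstep, ih ht a (if run == 4 then four + 1 else four) 1 ha]
        have hcnt : (a :: t).count p = 0 := by
          rw [List.count_eq_zero]
          intro hmem
          rcases List.mem_cons.mp hmem with h | h
          · exact hap h.symm
          · exact hpt h
        have hfil : (a :: t).filter (fun x => !(x == p)) = a :: t := by
          rw [List.filter_cons_of_pos, List.filter_eq_self.mpr]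
          · intro x hx
            have hlt : p < x := lt_of_lt_of_le hpa' (ha x hx)
            simp [ne_of_gt hlt]
          · simp [hap]
        rw [hcnt, hfil, ehD_cons]
        have hcnt2 : (a :: t).count a = t.count a + 1 := by
          rw [List.count_cons]; simp
        rw [hcnt2]
        push_cast
        generalize ehD (List.filter (fun x => !x == a) t) = E
        simp only [beq_iff_eq]
        split_ifs <;> omega

theorem ehB0 (l : List Int) (hs : l.Pairwise (· ≤ ·)) :
    (let s := l.foldl ehStep (0, 0, none);
     if s.2.1 == 4 then s.1 + 1 else s.1) = ehD l := by
  cases l with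
  | nil => rfl
  | cons a t =>
      rw [List.pairwise_cons] at hs
      obtain ⟨ha, ht⟩ := hs
      simp only [List.foldl_cons]
      have hstep : ehStep (0, 0, none) a = (0, 1, some a) := by simp [ehStep]
      rw [hstep, ehRun t ht a 0 1 ha, ehD_cons]
      have hcnt : (a :: t).count a = t.count a + 1 := by
        rw [List.count_cons]; simp
      rw [hcnt]
      push_cast
      generalize ehD (List.filter (fun x => !x == a) t) = E
      simp only [beq_iff_eq]
      split_ifs <;> omega

theorem examine_hand_eq_alt (hand : List Int) : examine_hand hand = examine_hand_alt hand := by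
  simp only [examine_hand, examine_hand_alt]
  set nums := hand.map (fun x => PySem.Int.mod x 13) with hnums
  set s := PySem.List.sorted nums (fun x => x) false with hsdef
  have hperm : s.Perm nums := PySem.List.sorted_perm nums (fun x => x) false
  have hsorted : s.Pairwise (· ≤ ·) := PySem.List.sorted_pairwise nums (fun x => x)
  rw [PySem.List.foldl_if_add_one (p := fun i => ((nums.count i : Int) == 4))]
  rw [ehB0 s hsorted]
  unfold ehD
  have hpred : (fun v => s.count v == 4) = (fun v => nums.count v == 4) := by
    funext v
    rw [hperm.count_eq]
  rw [hpred]
  have hcntP : (PySem.List.pyRange 0 13 1).countP (fun i => ((nums.count i : Int) == 4))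
      = (PySem.List.pyRange 0 13 1).countP (fun i => nums.count i == 4) := by
    apply List.countP_congr
    intro x _
    by_cases h : nums.count x = 4
    · simp [h]
    · have h' : (nums.count x : Int) ≠ 4 := by exact_mod_cast h
      simp [h, h']
  rw [hcntP]
  have hmain : (PySem.List.pyRange 0 13 1).countP (fun i => nums.count i == 4)
      = s.dedup.countP (fun v => nums.count v == 4) := by
    apply countP_eq_of_nodup _ _ _ ?_ (List.nodup_dedup s)
    · intro x hx
      have hxmem : x ∈ nums := by
        rw [beq_iff_eq] at hx
        exact List.count_pos_iff.mp (by omega)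
      have hxs : x ∈ s.dedup := List.mem_dedup.mpr (hperm.mem_iff.mpr hxmem)
      have hxr : x ∈ PySem.List.pyRange 0 13 1 := by
        rw [PySem.List.mem_pyRange_one]
        obtain ⟨y, _, hy⟩ := List.mem_map.mp hxmem
        have h0 := PySem.Int.mod_nonneg y (b := 13) (by norm_num)
        have h1 := PySem.Int.mod_lt y (b := 13) (by norm_num)
        omega
      exact ⟨fun _ => hxs, fun _ => hxr⟩
    · decide
  rw [hmain]
  ring

-- ===== VERDICT (by name: the statement is the Claim_ definition above) =====
theorem examine_hand_spec : Claim_equal_examine_hand := by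
  intro hand _
  unfold Spec_examine_hand
  exact examine_hand_eq_alt hand
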